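-- pv_equiv track=rewrite | github.com/MaoCarmona/BcnModule | Legacy/appBCNGRB 1.py | getConvertirXML
-- ===== SOURCE A (Python) =====
-- def getConvertirXML(IDatosRS, InmTag):
--     dbColQuery = IDatosRS[0].keys()
--     vCont = 0
--     vEntrar = True
--     arrItems = []
--     for I in range(len(IDatosRS)):
--         vCont = vCont + 1
--         if vEntrar == True:
--             vXMLs = "<" + InmTag + ">"
--             vEntrar = False
--         vRegXML = "<reg>"
--         for itm in dbColQuery:
--             vRegXML += "<" + itm + ">" +  str(IDatosRS[I][itm])  + "</" + itm + ">"
--         vRegXML += "</reg>"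
--         vXMLs = vXMLs + vRegXML
--         if vCont == 90:
--             vXMLs += "</" + InmTag + ">"
--             arrItems.append(vXMLs)
--             vCont = 0
--             vEntrar = True
--
--     if vEntrar == False:
--         vXMLs += "</" + InmTag + ">"
--         arrItems.append(vXMLs)
--     return arrItems
-- ===== SOURCE B (Python) =====
-- def getConvertirXML(IDatosRS, InmTag):
--     dbColQuery = list(IDatosRS[0].keys())
--     arrItems = []
--     rest = IDatosRS
--     while rest:
--         batch, rest = rest[:90], rest[90:]
--         body = "".join(
--             "<reg>"
--             + "".join("<" + c + ">" + str(row[c]) + "</" + c + ">" for c in dbColQuery)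
--             + "</reg>"
--             for row in batch
--         )
--         arrItems.append("<" + InmTag + ">" + body + "</" + InmTag + ">")
--     return arrItems
-- ===== Notes on version B (the rewrite author's own statement) =====
-- stated objective: simpler
-- what changed: Replaced A's single-pass state machine (vCont counter, vEntrar flag, incremental vXMLs string) with slicing the rows into batches of 90 and emitting one joined string per batch.
import Mathlib
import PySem

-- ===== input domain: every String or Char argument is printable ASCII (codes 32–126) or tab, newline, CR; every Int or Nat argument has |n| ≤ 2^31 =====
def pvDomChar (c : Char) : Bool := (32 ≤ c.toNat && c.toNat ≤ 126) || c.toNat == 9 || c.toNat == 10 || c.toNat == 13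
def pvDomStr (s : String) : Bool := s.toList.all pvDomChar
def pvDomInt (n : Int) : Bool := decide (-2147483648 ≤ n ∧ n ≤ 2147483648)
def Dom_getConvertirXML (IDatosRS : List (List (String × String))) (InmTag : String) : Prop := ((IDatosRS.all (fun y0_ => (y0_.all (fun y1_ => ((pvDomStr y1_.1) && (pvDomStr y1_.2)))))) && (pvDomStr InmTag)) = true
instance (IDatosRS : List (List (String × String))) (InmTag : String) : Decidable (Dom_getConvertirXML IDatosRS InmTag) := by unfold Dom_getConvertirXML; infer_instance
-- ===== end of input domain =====

-- B restructures A's single-pass counter/flag state machine into slicing the rows into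
-- batches of 90 and building each batch string by joining per-row strings (objective: simpler).
-- Pre_ excludes only inputs where the Python raises (empty list → IndexError; a row missing
-- a key of the first row → KeyError); B raises there too.

-- ===== PORT A =====
-- inner column loop: vRegXML = "<reg>"; for itm in dbColQuery: vRegXML += …
def pvRowA (dbColQuery : List String) (row : PySem.Dict String String) : String :=
  dbColQuery.foldl
    (fun vRegXML itm =>
      vRegXML ++ "<" ++ itm ++ ">" ++ ((PySem.Dict.get? row itm).getD "") ++ "</" ++ itm ++ ">")
    "<reg>"

-- one iteration of A's main loop; state = (vCont, vEntrar, vXMLs, arrItems)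
def pvStepA (dbColQuery : List String) (InmTag : String)
    (st : Int × Bool × String × List String) (row : PySem.Dict String String) :
    Int × Bool × String × List String :=
  let (vCont, vEntrar, vXMLs, arrItems) := st
  let vCont := vCont + 1
  let (vXMLs, vEntrar) := if vEntrar = true then ("<" ++ InmTag ++ ">", false) else (vXMLs, vEntrar)
  let vRegXML := pvRowA dbColQuery row ++ "</reg>"
  let vXMLs := vXMLs ++ vRegXML
  if vCont == 90 then
    (0, true, vXMLs ++ "</" ++ InmTag ++ ">", arrItems ++ [vXMLs ++ "</" ++ InmTag ++ ">"])
  else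
    (vCont, vEntrar, vXMLs, arrItems)

-- the trailing 'if vEntrar == False: …; return arrItems'
def pvFinishA (InmTag : String) (st : Int × Bool × String × List String) : List String :=
  let (_, vEntrar, vXMLs, arrItems) := st
  if vEntrar = false then arrItems ++ [vXMLs ++ "</" ++ InmTag ++ ">"] else arrItems

def getConvertirXML (IDatosRS : List (List (String × String))) (InmTag : String) : List String :=
  let dicts := IDatosRS.map PySem.Dict.ofList
  let dbColQuery := (PySem.List.pyGetD dicts 0 PySem.Dict.empty).keys
  pvFinishA InmTag
    ((PySem.List.pyRange 0 (dicts.length : Int) 1).foldl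
      (fun st I => pvStepA dbColQuery InmTag st (PySem.List.pyGetD dicts I PySem.Dict.empty))
      (0, true, "", []))

-- ===== PORT B =====
-- "<reg>" + "".join(per-column pieces) + "</reg>"
def pvRegB (dbColQuery : List String) (row : PySem.Dict String String) : String :=
  "<reg>" ++
    PySem.Str.join ""
      (dbColQuery.map (fun c => "<" ++ c ++ ">" ++ ((PySem.Dict.get? row c).getD "") ++ "</" ++ c ++ ">")) ++
  "</reg>"

-- while rest: batch, rest = rest[:90], rest[90:]; arrItems.append(open + body + close)
def pvLoopB (dbColQuery : List String) (InmTag : String)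
    (rest : List (PySem.Dict String String)) (arrItems : List String) : List String :=
  if h : rest = [] then arrItems
  else
    let batch := PySem.List.slice rest none (some 90)
    let rest' := PySem.List.slice rest (some 90) none
    let body := PySem.Str.join "" (batch.map (pvRegB dbColQuery))
    pvLoopB dbColQuery InmTag rest'
      (arrItems ++ ["<" ++ InmTag ++ ">" ++ body ++ "</" ++ InmTag ++ ">"])
termination_by rest.length
decreasing_by
  have h2 := PySem.List.slice_from rest (a := 90) (by norm_num)
  rw [h2]
  simp only [List.length_drop]
  have : 0 < rest.length := List.length_pos_iff.mpr h
  omega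

def getConvertirXML_alt (IDatosRS : List (List (String × String))) (InmTag : String) : List String :=
  let dicts := IDatosRS.map PySem.Dict.ofList
  let dbColQuery := (PySem.List.pyGetD dicts 0 PySem.Dict.empty).keys
  pvLoopB dbColQuery InmTag dicts []

-- ===== PRECONDITION & SPEC =====
-- Pre_ excludes exactly the inputs where Python A raises: the empty list (IndexError on
-- IDatosRS[0]) and inputs where some row lacks a key of the first row (KeyError).
def Pre_getConvertirXML (IDatosRS : List (List (String × String))) (InmTag : String) : Prop :=
  IDatosRS ≠ [] ∧
  (IDatosRS.all (fun row =>
    ((PySem.Dict.ofList (IDatosRS.headD [])).keys).all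
      (fun k => (PySem.Dict.ofList row).contains k))) = true

instance (IDatosRS : List (List (String × String))) (InmTag : String) : Decidable (Pre_getConvertirXML IDatosRS InmTag) := by unfold Pre_getConvertirXML; infer_instance

def pvWitness_getConvertirXML : (List (List (String × String))) × String :=
  ([[("a", "1"), ("b", "x")], [("a", "2"), ("b", "y")]], "rows")

def Spec_getConvertirXML (IDatosRS : List (List (String × String))) (InmTag : String) (out : List String) : Prop := out = getConvertirXML_alt IDatosRS InmTag
instance (IDatosRS : List (List (String × String))) (InmTag : String) (out : List String) : Decidable (Spec_getConvertirXML IDatosRS InmTag out) := by unfold Spec_getConvertirXML; infer_instance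

-- ===== CLAIM (what is proved, stated in full; the proofs are below) =====
def Claim_equal_getConvertirXML : Prop := ∀ (IDatosRS : List (List (String × String))) (InmTag : String), Dom_getConvertirXML IDatosRS InmTag → Pre_getConvertirXML IDatosRS InmTag → Spec_getConvertirXML IDatosRS InmTag (getConvertirXML IDatosRS InmTag)

-- ===== LEMMAS AND PROOFS =====

-- A's incremental vXMLs accumulation over a list of rows, starting from s
def pvInnerA (dbColQuery : List String) (s : String) (rows : List (PySem.Dict String String)) : String :=
  rows.foldl (fun t r => t ++ (pvRowA dbColQuery r ++ "</reg>")) s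

-- "".join over a cons (empty separator)
theorem joinEmptyCons (x : String) (xs : List String) :
    PySem.Str.join "" (x :: xs) = x ++ PySem.Str.join "" xs := by
  apply String.toList_inj.mp
  cases xs with
  | nil => simp [PySem.Str.toList_join, PySem.Chars.join_singleton, PySem.Chars.join_nil]
  | cons y ys => simp [PySem.Str.toList_join, PySem.Chars.join_cons_cons]

-- a string-appending foldl is the start string followed by the "".join of the pieces
theorem pvFoldJoin {α : Type} (f : α → String) :
    ∀ (l : List α) (s : String), l.foldl (fun t x => t ++ f x) s = s ++ PySem.Str.join "" (l.map f) := by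
  intro l
  induction l with
  | nil =>
      intro s
      apply String.toList_inj.mp
      simp [PySem.Str.toList_join, PySem.Chars.join_nil]
  | cons a l ih =>
      intro s
      simp only [List.foldl_cons, List.map_cons, joinEmptyCons, ih]
      apply String.toList_inj.mp
      simp

-- A's inner column foldl, from an arbitrary start string
theorem pvRowGen (r : PySem.Dict String String) :
    ∀ (cols : List String) (s : String),
      cols.foldl
        (fun vRegXML itm =>
          vRegXML ++ "<" ++ itm ++ ">" ++ ((PySem.Dict.get? r itm).getD "") ++ "</" ++ itm ++ ">") s =
      s ++ PySem.Str.join ""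
        (cols.map (fun c => "<" ++ c ++ ">" ++ ((PySem.Dict.get? r c).getD "") ++ "</" ++ c ++ ">")) := by
  intro cols
  induction cols with
  | nil =>
      intro s
      apply String.toList_inj.mp
      simp [PySem.Str.toList_join, PySem.Chars.join_nil]
  | cons a l ih =>
      intro s
      simp only [List.foldl_cons, List.map_cons, joinEmptyCons, ih]
      apply String.toList_inj.mp
      simp

-- per-row bridge: A's foldl-built <reg>...</reg> equals B's join-built one
theorem pvRow_bridge (cols : List String) (r : PySem.Dict String String) :
    pvRowA cols r ++ "</reg>" = pvRegB cols r := by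
  unfold pvRowA pvRegB
  rw [pvRowGen r cols "<reg>"]

-- batch bridge: A's accumulation = s ++ B's joined body
theorem pvInner_bridge (cols : List String) (s : String) (rows : List (PySem.Dict String String)) :
    pvInnerA cols s rows = s ++ PySem.Str.join "" (rows.map (pvRegB cols)) := by
  unfold pvInnerA
  rw [pvFoldJoin (fun r => pvRowA cols r ++ "</reg>") rows s]
  simp only [pvRow_bridge]

-- a full batch string, written the way B writes it
theorem pvBatch (cols : List String) (tag : String) (rows : List (PySem.Dict String String)) :
    pvInnerA cols ("<" ++ tag ++ ">") rows ++ "</" ++ tag ++ ">" =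
      "<" ++ tag ++ ">" ++ PySem.Str.join "" (rows.map (pvRegB cols)) ++ "</" ++ tag ++ ">" := by
  rw [pvInner_bridge]

-- partial-state lemma: from (c, False, s, acc) with c ≤ 89 the loop either finishes the
-- batch (≤ 90-c rows left) or flushes after 90-c rows and restarts fresh
theorem pvPartial (cols : List String) (tag : String) :
    ∀ (rows : List (PySem.Dict String String)) (c : Nat) (s : String) (acc : List String),
      c ≤ 89 →
      pvFinishA tag (rows.foldl (pvStepA cols tag) ((c : Int), false, s, acc)) =
        if rows.length + c ≤ 90 then
          acc ++ [pvInnerA cols s rows ++ "</" ++ tag ++ ">"]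
        else
          pvFinishA tag ((rows.drop (90 - c)).foldl (pvStepA cols tag)
            (0, true, pvInnerA cols s (rows.take (90 - c)) ++ "</" ++ tag ++ ">",
             acc ++ [pvInnerA cols s (rows.take (90 - c)) ++ "</" ++ tag ++ ">"])) := by
  intro rows
  induction rows with
  | nil =>
      intro c s acc hc
      rw [if_pos (by simp only [List.length_nil, Nat.zero_add]; omega)]
      simp [pvFinishA, pvInnerA]
  | cons r rs ih =>
      intro c s acc hc
      by_cases h89 : c = 89
      · subst h89
        have hstep : pvStepA cols tag (((89 : Nat) : Int), false, s, acc) r =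
            (0, true, pvInnerA cols s [r] ++ "</" ++ tag ++ ">",
             acc ++ [pvInnerA cols s [r] ++ "</" ++ tag ++ ">"]) := by
          simp [pvStepA, pvInnerA]
        rw [List.foldl_cons, hstep]
        by_cases hnil : rs = []
        · subst hnil
          rw [if_pos (by simp)]
          simp [pvFinishA]
        · have hpos : 0 < rs.length := List.length_pos_iff.mpr hnil
          rw [if_neg (by simp only [List.length_cons]; omega)]
          norm_num [List.take_succ_cons, List.drop_succ_cons]
      · have hlt : c < 89 := by omega
        have hc90 : (((c : Int) + 1) == (90 : Int)) = false := by
          simp only [beq_eq_false_iff_ne]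
          omega
        have hstep : pvStepA cols tag (((c : Nat) : Int), false, s, acc) r =
            ((((c + 1 : Nat)) : Int), false, pvInnerA cols s [r], acc) := by
          simp [pvStepA, pvInnerA, hc90]
        rw [List.foldl_cons, hstep, ih (c + 1) (pvInnerA cols s [r]) acc (by omega)]
        simp only [List.length_cons]
        by_cases h90 : rs.length + 1 + c ≤ 90
        · rw [if_pos (by omega), if_pos h90]
          rfl
        · rw [if_neg (by omega), if_neg h90]
          have h1 : (90 : Nat) - c = (89 - c) + 1 := by omega
          have h2 : (90 : Nat) - (c + 1) = 89 - c := by omega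
          rw [h2, h1, List.take_succ_cons, List.drop_succ_cons]
          rfl

-- fresh-state lemma: from (0, True, s, acc) the whole loop plus final flush is B's batched loop
theorem pvFresh (cols : List String) (tag : String) :
    ∀ (rows : List (PySem.Dict String String)) (s : String) (acc : List String),
      pvFinishA tag (rows.foldl (pvStepA cols tag) (0, true, s, acc)) =
        pvLoopB cols tag rows acc := by
  have main : ∀ (n : Nat) (rows : List (PySem.Dict String String)), rows.length = n →
      ∀ (s : String) (acc : List String),
      pvFinishA tag (rows.foldl (pvStepA cols tag) (0, true, s, acc)) =
        pvLoopB cols tag rows acc := by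
    intro n
    induction n using Nat.strong_induction_on with
    | _ n IH =>
      intro rows hlen s acc
      match rows with
      | [] =>
          rw [pvLoopB]
          simp [pvFinishA]
      | r :: rs =>
          rw [List.foldl_cons]
          have hstep : pvStepA cols tag (0, true, s, acc) r =
              (((1 : Nat) : Int), false, pvInnerA cols ("<" ++ tag ++ ">") [r], acc) := by
            simp [pvStepA, pvInnerA]
          rw [hstep, pvPartial cols tag rs 1 _ acc (by omega)]
          by_cases hle : rs.length + 1 ≤ 90
          · rw [if_pos hle]
            rw [pvLoopB, dif_neg (by simp : ¬ ((r :: rs) = []))]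
            have hb : PySem.List.slice (r :: rs) none (some 90) = r :: rs := by
              rw [PySem.List.slice_to (r :: rs) (b := 90) (by norm_num),
                show Int.toNat 90 = 90 from rfl]
              exact List.take_of_length_le (by simp; omega)
            have hr' : PySem.List.slice (r :: rs) (some 90) = [] := by
              rw [PySem.List.slice_from (r :: rs) (a := 90) (by norm_num),
                show Int.toNat 90 = 90 from rfl]
              exact List.drop_eq_nil_of_le (by simp; omega)
            rw [hb, hr', pvLoopB]
            rw [dif_pos rfl]
            have hs : pvInnerA cols (pvInnerA cols ("<" ++ tag ++ ">") [r]) rs ++ "</" ++ tag ++ ">" =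
                "<" ++ tag ++ ">" ++ PySem.Str.join "" ((r :: rs).map (pvRegB cols)) ++ "</" ++ tag ++ ">" :=
              pvBatch cols tag (r :: rs)
            rw [hs]
          · rw [if_neg hle]
            rw [show (90 : Nat) - 1 = 89 from rfl]
            have hn : rs.length + 1 = n := by simpa using hlen
            rw [IH (n - 90) (by omega) (rs.drop 89) (by simp only [List.length_drop]; omega)]
            conv_rhs => rw [pvLoopB]
            rw [dif_neg (by simp : ¬ ((r :: rs) = []))]
            have hb : PySem.List.slice (r :: rs) none (some 90) = r :: rs.take 89 := by
              rw [PySem.List.slice_to (r :: rs) (b := 90) (by norm_num)]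
              rfl
            have hr' : PySem.List.slice (r :: rs) (some 90) = rs.drop 89 := by
              rw [PySem.List.slice_from (r :: rs) (a := 90) (by norm_num)]
              rfl
            rw [hb, hr']
            have hs : pvInnerA cols (pvInnerA cols ("<" ++ tag ++ ">") [r]) (rs.take 89) ++ "</" ++ tag ++ ">" =
                "<" ++ tag ++ ">" ++ PySem.Str.join "" ((r :: rs.take 89).map (pvRegB cols)) ++ "</" ++ tag ++ ">" :=
              pvBatch cols tag (r :: rs.take 89)
            rw [hs]
  intro rows s acc
  exact main rows.length rows rfl s acc

-- ===== VERDICT (by name: the statement is the Claim_ definition above) =====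
theorem getConvertirXML_spec : Claim_equal_getConvertirXML := by
  intro IDatosRS InmTag _ _
  unfold Spec_getConvertirXML getConvertirXML getConvertirXML_alt
  dsimp only
  rw [PySem.List.foldl_pyRange_zero_pyGetD' (List.map PySem.Dict.ofList IDatosRS) PySem.Dict.empty (pvStepA ((PySem.List.pyGetD (List.map PySem.Dict.ofList IDatosRS) 0 PySem.Dict.empty).keys) InmTag)]
  exact pvFresh _ _ _ _ _
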